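-- pv_equiv track=rewrite | github.com/Tallete/Learning-python | 02 contar palabras en texto.py | only_words
-- ===== SOURCE A (Python) =====
-- import string
--
-- def only_words(text):
--     # tomar solo aquellas que están formadas por letras, y las pasamos a minúscula.
--     list = text.split(" ")
--     only_words_letter = []
--     alphabet = string.ascii_letters + "ñ"    # solo para el español  :)
--     for word in list:
--         for letter in word:
--             if letter not in alphabet:
--                 break
--         else:
--             only_words_letter.append(word.lower())
--     return only_words_letter
-- ===== SOURCE B (Python) =====
-- import string
--
-- def only_words(text):
--     # single-pass character state machine: build each word lowered on the fly,
--     # flush on space, drop a word as soon as a non-letter is seen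
--     letters = string.ascii_letters + "\u00f1"
--     res = []
--     buf = []
--     ok = True
--     for ch in text:
--         if ch == " ":
--             if ok:
--                 res.append("".join(buf))
--             buf = []
--             ok = True
--         elif ch in letters:
--             buf.append(ch.lower())
--         else:
--             ok = False
--     if ok:
--         res.append("".join(buf))
--     return res
-- ===== Notes on version B (the rewrite author's own statement) =====
-- stated objective: alternative
-- what changed: Replaces split-then-per-word-scan with a single character-level state machine over the whole text that builds each word lowered on the fly, flushes it on a space, and drops it as soon as a non-letter is seen (no split, no nested scan).
import Mathlib
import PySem

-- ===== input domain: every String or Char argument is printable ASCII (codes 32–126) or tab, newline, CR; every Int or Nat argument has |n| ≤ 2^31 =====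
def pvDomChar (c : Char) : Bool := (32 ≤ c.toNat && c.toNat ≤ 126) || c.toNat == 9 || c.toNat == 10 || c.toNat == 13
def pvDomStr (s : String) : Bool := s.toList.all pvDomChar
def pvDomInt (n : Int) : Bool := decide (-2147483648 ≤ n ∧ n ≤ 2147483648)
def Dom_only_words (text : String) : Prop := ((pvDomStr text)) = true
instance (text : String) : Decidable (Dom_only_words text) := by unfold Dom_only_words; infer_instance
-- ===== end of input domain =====

-- B replaces A's split-then-per-word-scan with a single character-level state
-- machine over the whole text (objective: alternative, same cost).

-- ===== PORT A =====
-- alphabet = string.ascii_letters + "ñ"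
def owAlphabet : List Char :=
  "abcdefghijklmnopqrstuvwxyzABCDEFGHIJKLMNOPQRSTUVWXYZñ".toList

-- the inner 'for letter in word: if letter not in alphabet: break / else: …'
def owInner : List Char → Bool
  | [] => true
  | c :: rest => if c ∈ owAlphabet then owInner rest else false

def only_words (text : String) : List String :=
  ((PySem.Str.split? text " ").getD []).foldl
    (fun acc w => if owInner w.toList then acc ++ [PySem.Str.lower w] else acc) []

-- ===== PORT B =====
-- one step of Source B's loop body on state (res, buf, ok)
def owStep (st : List String × List Char × Bool) (c : Char) :
    List String × List Char × Bool :=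
  if c = ' ' then
    ((if st.2.2 then st.1 ++ [String.ofList st.2.1] else st.1), [], true)
  else if c ∈ owAlphabet then
    (st.1, st.2.1 ++ [PySem.Chars.lowerChar c], st.2.2)
  else
    (st.1, st.2.1, false)

def only_words_alt (text : String) : List String :=
  let st := text.toList.foldl owStep ([], [], true)
  if st.2.2 then st.1 ++ [String.ofList st.2.1] else st.1

-- ===== PRECONDITION & SPEC =====
def Spec_only_words (text : String) (out : List String) : Prop := out = only_words_alt text
instance (text : String) (out : List String) : Decidable (Spec_only_words text out) := by unfold Spec_only_words; infer_instance

-- ===== CLAIM (what is proved, stated in full; the proofs are below) =====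
def Claim_equal_only_words : Prop := ∀ (text : String), Dom_only_words text → Spec_only_words text (only_words text)

-- ===== LEMMAS AND PROOFS =====

-- split(" ") of a char list, first piece continuing the prefix p
def wSplit (p : List Char) : List Char → List (List Char)
  | [] => [p]
  | c :: l => if c = ' ' then p :: wSplit [] l else wSplit (p ++ [c]) l

-- the for/else-break scan tests exactly "every character is in the alphabet"
theorem owInner_eq_all (l : List Char) : owInner l = l.all (fun c => decide (c ∈ owAlphabet)) := by
  induction l with
  | nil => rfl
  | cons c rest ih =>
    simp only [owInner, List.all_cons, ih]
    by_cases h : c ∈ owAlphabet <;> simp [h]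

theorem go_eq_wSplit (fuel : Nat) :
    ∀ (l cur : List Char) (acc : List (List Char)), l.length < fuel →
      PySem.Chars.splitOn.go [' '] fuel l cur acc = acc.reverse ++ wSplit cur.reverse l := by
  induction fuel with
  | zero => intro l cur acc h; omega
  | succ fuel ih =>
    intro l cur acc h
    cases l with
    | nil => simp [PySem.Chars.splitOn.go, wSplit]
    | cons c rest =>
      by_cases hc : c = ' '
      · subst hc
        have hpre : List.isPrefixOf [' '] (' ' :: rest) = true := by
          simp [List.isPrefixOf]
        simp only [PySem.Chars.splitOn.go, hpre, if_true, List.length_cons, List.length_nil,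
          List.drop_succ_cons, List.drop_zero]
        rw [ih rest [] (cur.reverse :: acc) (by simpa using Nat.lt_of_succ_lt_succ h)]
        simp [wSplit]
      · have hpre : List.isPrefixOf [' '] (c :: rest) = false := by
          simp [List.isPrefixOf]; exact fun hh => hc hh.symm
        simp only [PySem.Chars.splitOn.go, hpre, Bool.false_eq_true, if_false]
        rw [ih rest (c :: cur) acc (by simpa using Nat.lt_of_succ_lt_succ h)]
        simp [wSplit, hc]

theorem splitOn_eq_wSplit (l : List Char) :
    PySem.Chars.splitOn l [' '] = wSplit [] l := by
  have := go_eq_wSplit (l.length + 1) l [] [] (by omega)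
  simpa [PySem.Chars.splitOn] using this

theorem split_words (text : String) :
    (PySem.Str.split? text " ").getD [] = (wSplit [] text.toList).map String.ofList := by
  have hsep : (" " : String).toList = [' '] := rfl
  simp [PySem.Str.split?, PySem.Chars.split?, hsep, splitOn_eq_wSplit]

-- A's value as filter-then-map over the split words
theorem A_eq (text : String) :
    only_words text =
      ((wSplit [] text.toList).filter (fun cs => owInner cs)).map
        (fun cs => PySem.Str.lower (String.ofList cs)) := by
  unfold only_words
  rw [split_words, PySem.List.foldl_append_if, List.filter_map, List.map_map]
  simp [Function.comp_def]

-- B's loop, written as structural recursion on the remaining characters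
def owRun : List Char → List Char → Bool → List String
  | [], buf, ok => if ok then [String.ofList buf] else []
  | c :: l, buf, ok =>
    if c = ' ' then
      (if ok then String.ofList buf :: owRun l [] true else owRun l [] true)
    else if c ∈ owAlphabet then owRun l (buf ++ [PySem.Chars.lowerChar c]) ok
    else owRun l buf false

theorem foldl_owStep_eq_owRun (l : List Char) :
    ∀ (res : List String) (buf : List Char) (ok : Bool),
      (let st := l.foldl owStep (res, buf, ok);
        if st.2.2 then st.1 ++ [String.ofList st.2.1] else st.1) = res ++ owRun l buf ok := by
  induction l with
  | nil => intro res buf ok; cases ok <;> simp [owRun]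
  | cons c l ih =>
    intro res buf ok
    simp only [List.foldl_cons, owStep, owRun]
    by_cases hc : c = ' '
    · subst hc
      simp only [if_true]
      rw [ih]
      cases ok <;> simp
    · by_cases ha : c ∈ owAlphabet <;> simp [hc, ha, ih]

theorem B_eq (text : String) : only_words_alt text = owRun text.toList [] true := by
  unfold only_words_alt
  have := foldl_owStep_eq_owRun text.toList [] [] true
  simpa using this

-- the machine's invariant: state after a space-free prefix p, against A's split
theorem owRun_key (l : List Char) :
    ∀ (p : List Char),
      owRun l ((p.filter (fun c => decide (c ∈ owAlphabet))).map PySem.Chars.lowerChar)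
        (p.all (fun c => decide (c ∈ owAlphabet))) =
      ((wSplit p l).filter (fun cs => owInner cs)).map
        (fun cs => PySem.Str.lower (String.ofList cs)) := by
  induction l with
  | nil =>
    intro p
    simp only [owRun, wSplit, List.filter]
    rw [owInner_eq_all]
    by_cases hp : p.all (fun c => decide (c ∈ owAlphabet)) = true
    · have hfil : p.filter (fun c => decide (c ∈ owAlphabet)) = p :=
        List.filter_eq_self.2 (by simpa [List.all_eq_true] using hp)
      simp [hp, hfil, PySem.Str.lower, PySem.Chars.lower]
    · simp [Bool.of_not_eq_true hp]
  | cons c l ih =>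
    intro p
    by_cases hc : c = ' '
    · subst hc
      have hsp : (' ' : Char) ∉ owAlphabet := by decide
      simp only [owRun, wSplit, if_true, List.filter_cons, owInner_eq_all p]
      by_cases hp : p.all (fun c => decide (c ∈ owAlphabet)) = true
      · have hfil : p.filter (fun c => decide (c ∈ owAlphabet)) = p :=
          List.filter_eq_self.2 (by simpa [List.all_eq_true] using hp)
        have := ih []
        simp only [List.filter_nil, List.map_nil, List.all_nil] at this
        simp [hp, hfil, this, PySem.Str.lower, PySem.Chars.lower]
      · have := ih []
        simp only [List.filter_nil, List.map_nil, List.all_nil] at this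
        simp [Bool.of_not_eq_true hp, this]
    · by_cases ha : c ∈ owAlphabet
      · have h1 : (p ++ [c]).filter (fun c => decide (c ∈ owAlphabet)) =
            p.filter (fun c => decide (c ∈ owAlphabet)) ++ [c] := by
          simp [List.filter_append, ha]
        have h2 : (p ++ [c]).all (fun c => decide (c ∈ owAlphabet)) =
            p.all (fun c => decide (c ∈ owAlphabet)) := by
          simp [List.all_append, ha]
        have := ih (p ++ [c])
        rw [h1, h2, List.map_append] at this
        simp only [owRun, wSplit, hc, if_false, ha, if_true]
        simpa using this
      · have h1 : (p ++ [c]).filter (fun c => decide (c ∈ owAlphabet)) =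
            p.filter (fun c => decide (c ∈ owAlphabet)) := by
          simp [List.filter_append, ha]
        have h2 : (p ++ [c]).all (fun c => decide (c ∈ owAlphabet)) = false := by
          simp [List.all_append, ha]
        have := ih (p ++ [c])
        rw [h1, h2] at this
        simp only [owRun, wSplit, hc, if_false, ha]
        simpa using this

-- ===== VERDICT (by name: the statement is the Claim_ definition above) =====
theorem only_words_spec : Claim_equal_only_words := by
  intro text _
  unfold Spec_only_words
  rw [A_eq, B_eq]
  have := owRun_key text.toList []
  simpa using this.symm
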